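-- pv_equiv track=rewrite | github.com/umutcakir/shiftscan | shiftscan/cli.py | find_translation_position
-- ===== SOURCE A (Python) =====
-- def find_all_occurrences(translation, amino_acid_sequence):
--     indices = []
--     index = translation.find(amino_acid_sequence)
--
--     while index != -1:
--         indices.append(index)
--         index = translation.find(amino_acid_sequence, index + 1)
--
--     return indices
--
-- def find_translation_position(nucleotide_sequence, amino_acid_sequence, codon_table):
--     positions = []
--
--     for frame in range(3):
--         translation = ""
--         for i in range(frame, len(nucleotide_sequence) - 2, 3):
--             codon = nucleotide_sequence[i:i + 3]
--             amino_acid = codon_table.get(codon, "-")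
--             translation += amino_acid
--
--         if amino_acid_sequence in translation:
--             position_list = find_all_occurrences(translation, amino_acid_sequence)
--             position = [(index * 3) + frame for index in position_list]
--             positions.append(position)
--
--     return [item for sublist in positions for item in sublist]
-- ===== SOURCE B (Python) =====
-- def find_translation_position(nucleotide_sequence, amino_acid_sequence, codon_table):
--     # Rabin-Karp: rolling polynomial hash over each frame's translation,
--     # verifying candidate windows, instead of repeated str.find scans.
--     BASE = 257
--     MOD = 1000000007
--     L = len(amino_acid_sequence)
--     ph = 0
--     for c in amino_acid_sequence:
--         ph = (ph * BASE + ord(c)) % MOD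
--     pw = 1
--     for _ in range(L - 1):
--         pw = (pw * BASE) % MOD
--     out = []
--     n = len(nucleotide_sequence)
--     for frame in range(3):
--         translation = "".join(
--             codon_table.get(nucleotide_sequence[i:i + 3], "-")
--             for i in range(frame, n - 2, 3)
--         )
--         T = len(translation)
--         if L == 0:
--             out.extend(i * 3 + frame for i in range(T + 1))
--             continue
--         if T < L:
--             continue
--         h = 0
--         for c in translation[:L]:
--             h = (h * BASE + ord(c)) % MOD
--         for i in range(T - L + 1):
--             if h == ph and translation[i:i + L] == amino_acid_sequence:
--                 out.append(i * 3 + frame)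
--             if i + L < T:
--                 h = ((h - ord(translation[i]) * pw) * BASE + ord(translation[i + L])) % MOD
--     return out
-- ===== Notes on version B (the rewrite author's own statement) =====
-- stated objective: alternative
-- what changed: Replaced the repeated str.find scan (find_all_occurrences helper, per-frame position lists, final flatten) with a Rabin-Karp search: a rolling polynomial hash (base 257 mod 1e9+7) is maintained over each frame's translation and only hash-matching windows are verified and emitted directly into one flat list.
import Mathlib
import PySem

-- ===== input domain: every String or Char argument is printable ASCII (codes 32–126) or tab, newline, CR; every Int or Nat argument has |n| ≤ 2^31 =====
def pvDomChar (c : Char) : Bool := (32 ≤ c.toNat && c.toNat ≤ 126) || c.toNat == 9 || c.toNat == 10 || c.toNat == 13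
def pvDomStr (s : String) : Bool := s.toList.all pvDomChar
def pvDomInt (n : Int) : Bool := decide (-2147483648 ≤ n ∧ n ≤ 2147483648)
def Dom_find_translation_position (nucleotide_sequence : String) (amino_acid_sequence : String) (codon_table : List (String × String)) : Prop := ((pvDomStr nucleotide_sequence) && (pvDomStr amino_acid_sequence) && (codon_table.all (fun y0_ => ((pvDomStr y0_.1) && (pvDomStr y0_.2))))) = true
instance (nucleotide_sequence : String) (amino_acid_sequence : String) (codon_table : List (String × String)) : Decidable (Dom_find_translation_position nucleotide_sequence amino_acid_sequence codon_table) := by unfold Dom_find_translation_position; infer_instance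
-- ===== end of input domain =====

-- B replaces A's repeated str.find scan with Rabin-Karp: a rolling polynomial hash
-- (base 257 mod 1e9+7) over each frame's translation, verifying hash-matching
-- windows and emitting positions directly into one flat list; objective: alternative.

-- ===== PORT A =====
-- The Python while-loop over `translation.find(amino_acid_sequence, index + 1)`:
-- fuel only makes the same computation total (each successful find strictly increases
-- index, which never exceeds len(translation), so length + 2 steps always suffice).
def faoLoop (t sub : List Char) : Int → Nat → List Int
  | _, 0 => []
  | index, fuel + 1 =>
    if index = -1 then []
    else index :: faoLoop t sub (PySem.Chars.findFrom t sub (index + 1)) fuel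

def find_all_occurrences (translation amino_acid_sequence : List Char) : List Int :=
  faoLoop translation amino_acid_sequence
    (PySem.Chars.find translation amino_acid_sequence) (translation.length + 2)

def find_translation_position (nucleotide_sequence : String) (amino_acid_sequence : String) (codon_table : List (String × String)) : List Int :=
  (((PySem.List.pyRange 0 3 1).foldl (fun positions frame =>
    (fun translation =>
      if PySem.Chars.isIn amino_acid_sequence.toList translation then
        positions ++ [(find_all_occurrences translation amino_acid_sequence.toList).map
          (fun index => index * 3 + frame)]
      else positions)
    ((PySem.List.pyRange frame ((nucleotide_sequence.toList.length : Int) - 2) 3).foldl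
      (fun acc i => acc ++ (PySem.Dict.getD ⟨codon_table⟩
        (String.ofList (PySem.Chars.slice nucleotide_sequence.toList (some i) (some (i + 3)))) "-").toList)
      [])) []) : List (List Int)).flatMap id

-- ===== PORT B =====
-- one Python hash step: h = (h * 257 + ord(c)) % 1000000007
def hashStep (h : Int) (c : Char) : Int :=
  PySem.Int.mod (h * 257 + (c.toNat : Int)) 1000000007

def find_translation_position_alt (nucleotide_sequence : String) (amino_acid_sequence : String) (codon_table : List (String × String)) : List Int :=
  (fun ph => (fun pw =>
    (PySem.List.pyRange 0 3 1).foldl (fun out frame =>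
      (fun translation => (fun T =>
        if amino_acid_sequence.toList.length = 0 then
          out ++ (PySem.List.pyRange 0 (T + 1) 1).map (fun i => i * 3 + frame)
        else if T < (amino_acid_sequence.toList.length : Int) then out
        else
          ((PySem.List.pyRange 0 (T - (amino_acid_sequence.toList.length : Int) + 1) 1).foldl
            (fun (s : List Int × Int) i =>
              ((if s.2 == ph &&
                    (PySem.Chars.slice translation (some i) (some (i + (amino_acid_sequence.toList.length : Int))) == amino_acid_sequence.toList) then
                  s.1 ++ [i * 3 + frame]
                else s.1),
               (if i + (amino_acid_sequence.toList.length : Int) < T then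
                  PySem.Int.mod
                    ((s.2 - ((PySem.List.pyGetD translation i ' ').toNat : Int) * pw) * 257 +
                      ((PySem.List.pyGetD translation (i + (amino_acid_sequence.toList.length : Int)) ' ').toNat : Int))
                    1000000007
                else s.2)))
            (out, (PySem.List.slice translation none (some (amino_acid_sequence.toList.length : Int))).foldl hashStep 0)).1)
        ((translation.length : Int)))
      (((PySem.List.pyRange frame ((nucleotide_sequence.toList.length : Int) - 2) 3).map
        (fun i => (PySem.Dict.getD ⟨codon_table⟩
          (String.ofList (PySem.Chars.slice nucleotide_sequence.toList (some i) (some (i + 3)))) "-").toList)).flatten)) [])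
    ((PySem.List.pyRange 0 ((amino_acid_sequence.toList.length : Int) - 1) 1).foldl
      (fun p _ => PySem.Int.mod (p * 257) 1000000007) 1))
  (amino_acid_sequence.toList.foldl hashStep 0)

-- ===== PRECONDITION & SPEC =====
def Spec_find_translation_position (nucleotide_sequence : String) (amino_acid_sequence : String) (codon_table : List (String × String)) (out : List Int) : Prop := out = find_translation_position_alt nucleotide_sequence amino_acid_sequence codon_table
instance (nucleotide_sequence : String) (amino_acid_sequence : String) (codon_table : List (String × String)) (out : List Int) : Decidable (Spec_find_translation_position nucleotide_sequence amino_acid_sequence codon_table out) := by unfold Spec_find_translation_position; infer_instance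

-- ===== CLAIM (what is proved, stated in full; the proofs are below) =====
def Claim_equal_find_translation_position : Prop := ∀ (nucleotide_sequence : String) (amino_acid_sequence : String) (codon_table : List (String × String)), Dom_find_translation_position nucleotide_sequence amino_acid_sequence codon_table → Spec_find_translation_position nucleotide_sequence amino_acid_sequence codon_table (find_translation_position nucleotide_sequence amino_acid_sequence codon_table)

-- ===== LEMMAS AND PROOFS =====

-- The canonical occurrence list: positions i ≥ k where sub occurs in t.
def occFrom (t sub : List Char) (k : Nat) : List Nat :=
  (List.range' k (t.length + 1 - k)).filter (fun i => decide (sub <+: t.drop i))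

theorem beq_eq_decide_listChar (a b : List Char) : (a == b) = decide (a = b) := by
  cases h : a == b
  · have : ¬ a = b := by simpa using h
    simp [this]
  · have : a = b := by simpa using h
    simp [this]

theorem prefix_drop_of_prefix_drop (t sub : List Char) {k i : Nat} (hk : k ≤ i)
    (h : sub <+: t.drop i) : sub <:+: t.drop k := by
  have hd : t.drop i = (t.drop k).drop (i - k) := by
    rw [List.drop_drop]; congr 1; omega
  rw [hd] at h
  exact h.isInfix.trans (List.drop_suffix _ _).isInfix

theorem occFrom_nil (t sub : List Char) (k : Nat) (h : ¬ sub <:+: t.drop k) :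
    occFrom t sub k = [] := by
  apply List.filter_eq_nil_iff.mpr
  intro i hi
  have hk : k ≤ i := (List.mem_range'_1.mp hi).1
  simp only [decide_eq_true_eq]
  exact fun hp => h (prefix_drop_of_prefix_drop t sub hk hp)

theorem occFrom_split (t sub : List Char) (k m : Nat) (hkm : k ≤ m) (hm : m ≤ t.length)
    (hp : sub <+: t.drop m) (hmin : ∀ i, k ≤ i → i < m → ¬ sub <+: t.drop i) :
    occFrom t sub k = m :: occFrom t sub (m + 1) := by
  unfold occFrom
  have hsplit : List.range' k (t.length + 1 - k) =
      List.range' k (m - k) ++ List.range' m (t.length + 1 - m) := by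
    have h1 : List.range' k (m - k) ++ List.range' (k + 1 * (m - k)) (t.length + 1 - m) =
        List.range' k ((m - k) + (t.length + 1 - m)) := List.range'_append
    rw [show k + 1 * (m - k) = m by omega] at h1
    rw [show t.length + 1 - k = (m - k) + (t.length + 1 - m) by omega]
    exact h1.symm
  rw [hsplit, List.filter_append]
  have h2 : (List.range' k (m - k)).filter (fun i => decide (sub <+: t.drop i)) = [] := by
    apply List.filter_eq_nil_iff.mpr
    intro i hi
    have := List.mem_range'_1.mp hi
    simp only [decide_eq_true_eq]
    exact hmin i this.1 (by omega)
  rw [h2, List.nil_append]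
  rw [show t.length + 1 - m = (t.length + 1 - (m + 1)) + 1 by omega, List.range'_succ]
  simp [hp]

theorem findFrom_gt_len (t sub : List Char) (j : Int) (hj : (t.length : Int) < j) :
    PySem.Chars.findFrom t sub j = -1 := by
  simp only [PySem.Chars.findFrom]
  split_ifs <;> first | rfl | omega

theorem fao_go (t sub : List Char) : ∀ (fuel k : Nat), k ≤ t.length + 1 →
    t.length + 1 - k < fuel →
    faoLoop t sub (PySem.Chars.findFrom t sub (k : Int)) fuel =
      (occFrom t sub k).map (fun (i : Nat) => (i : Int)) := by
  intro fuel
  induction fuel with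
  | zero => intro k h1 h2; omega
  | succ fuel ih =>
    intro k hk hfuel
    by_cases hk1 : k = t.length + 1
    · have hneg : PySem.Chars.findFrom t sub (k : Int) = -1 :=
        findFrom_gt_len t sub _ (by omega)
      rw [hneg]
      have : occFrom t sub k = [] := by
        unfold occFrom
        rw [show t.length + 1 - k = 0 by omega]
        simp
      simp [faoLoop, this]
    · have hklen : k ≤ t.length := by omega
      by_cases hr : PySem.Chars.findFrom t sub (k : Int) = -1
      · rw [hr]
        have hninf : ¬ sub <:+: t.drop k :=
          (PySem.Chars.findFrom_natCast_eq_neg_one_iff t sub k hklen).mp hr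
        rw [occFrom_nil t sub k hninf]
        simp [faoLoop]
      · obtain ⟨hkr, hpre, hmin⟩ := PySem.Chars.findFrom_natCast_spec t sub k hklen hr
        set r := PySem.Chars.findFrom t sub (k : Int) with hrdef
        have hr0 : 0 ≤ r := le_trans (by positivity) hkr
        have hrlen : r ≤ t.length := by
          have heq := PySem.Chars.findFrom_natCast t sub k hklen
          rw [← hrdef] at heq
          by_cases hf : PySem.Chars.find (t.drop k) sub = -1
          · rw [if_pos hf] at heq; omega
          · rw [if_neg hf] at heq
            have := PySem.Chars.find_le_length (t.drop k) sub
            rw [heq]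
            simp only [List.length_drop] at this
            omega
        set m := r.toNat with hmdef
        have hrm : r = (m : Int) := by omega
        have hmlen : m ≤ t.length := by omega
        have hkm : k ≤ m := by omega
        rw [occFrom_split t sub k m hkm hmlen hpre (fun i h1 h2 => hmin i h1 h2)]
        show faoLoop t sub r (fuel + 1) = _
        rw [faoLoop]
        rw [if_neg hr, hrm]
        have hstep : ((m : Int) + 1) = ((m + 1 : Nat) : Int) := by push_cast; ring
        rw [hstep, ih (m + 1) (by omega) (by omega)]
        simp

theorem find_all_eq (t sub : List Char) :
    find_all_occurrences t sub = (occFrom t sub 0).map (fun (i : Nat) => (i : Int)) := by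
  unfold find_all_occurrences
  rw [← PySem.Chars.findFrom_zero]
  have : (0 : Int) = ((0 : Nat) : Int) := by norm_num
  rw [this, fao_go t sub (t.length + 2) 0 (by omega) (by omega)]

-- A's per-frame contribution (guard + helper + position map), flattened.
theorem A_contrib (t sub : List Char) (frame : Int) (pos : List (List Int)) :
    ((if PySem.Chars.isIn sub t then
        pos ++ [(find_all_occurrences t sub).map (fun index => index * 3 + frame)]
      else pos) : List (List Int)).flatMap id
    = pos.flatMap id ++ (occFrom t sub 0).map (fun (i : Nat) => (i : Int) * 3 + frame) := by
  by_cases h : PySem.Chars.isIn sub t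
  · rw [if_pos h, List.flatMap_append]
    congr 1
    rw [find_all_eq]
    simp [List.map_map, Function.comp]
  · rw [if_neg h]
    have hninf : ¬ sub <:+: t := by
      intro hinf
      exact h ((PySem.Chars.isIn_iff_infix sub t).mpr hinf)
    have : occFrom t sub 0 = [] := by
      apply occFrom_nil
      rw [List.drop_zero]
      exact hninf
    simp [this]

-- ======= B-side: Rabin-Karp correctness =======

-- the pure (un-reduced) polynomial value of a char list
def polyF (a : Int) (c : Char) : Int := a * 257 + (c.toNat : Int)
def pvHash (s : List Char) : Int := s.foldl polyF 0

theorem mod_big (a : Int) : PySem.Int.mod a 1000000007 = a % 1000000007 :=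
  PySem.Int.mod_eq_emod_of_pos (by norm_num)

theorem hashStep_foldl (s : List Char) : ∀ a : Int,
    s.foldl hashStep (a % 1000000007) = (s.foldl polyF a) % 1000000007 := by
  induction s with
  | nil => intro a; simp
  | cons c s ih =>
    intro a
    have h1 : hashStep (a % 1000000007) c = (polyF a c) % 1000000007 := by
      unfold hashStep polyF
      rw [mod_big]
      omega
    simp only [List.foldl_cons, h1, ih (polyF a c)]

theorem hashOf_eq (s : List Char) : s.foldl hashStep 0 = pvHash s % 1000000007 := by
  have : (0 : Int) = (0 : Int) % 1000000007 := by norm_num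
  rw [this, hashStep_foldl]; rfl

theorem polyShift (s : List Char) : ∀ a : Int,
    s.foldl polyF a = a * 257 ^ s.length + pvHash s := by
  induction s with
  | nil => intro a; simp [pvHash]
  | cons c s ih =>
    intro a
    have h0 : polyF 0 c = (c.toNat : Int) := by unfold polyF; ring
    have hc : pvHash (c :: s) = (c.toNat : Int) * 257 ^ s.length + pvHash s := by
      unfold pvHash
      simp only [List.foldl_cons]
      rw [ih (polyF 0 c), h0]
      rfl
    simp only [List.foldl_cons, List.length_cons]
    rw [ih (polyF a c), hc]
    unfold polyF
    ring

theorem powloop (n : Nat) :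
    (List.range n).foldl (fun p _ => PySem.Int.mod (p * 257) 1000000007) 1
      = 257 ^ n % 1000000007 := by
  induction n with
  | zero => norm_num
  | succ n ih =>
    rw [List.range_succ, List.foldl_append, ih]
    simp only [List.foldl_cons, List.foldl_nil, mod_big]
    rw [pow_succ, Int.mul_emod _ 257, Int.emod_emod_of_dvd _ dvd_rfl, ← Int.mul_emod]

-- predicate of B's verification test
theorem slice_beq_eq (t sub : List Char) (i : Nat) :
    (PySem.Chars.slice t (some (i : Int)) (some ((i : Int) + (sub.length : Int))) == sub)
      = decide (sub <+: t.drop i) := by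
  have hcast : ((i : Int) + (sub.length : Int)) = ((i + sub.length : Nat) : Int) := by push_cast; ring
  rw [hcast, PySem.Chars.slice_eq_listSlice, PySem.List.slice_natCast]
  rw [show i + sub.length - i = sub.length by omega]
  rw [beq_eq_decide_listChar]
  apply decide_eq_decide.mpr
  constructor
  · intro h; rw [← h]; exact List.take_prefix _ _
  · intro h
    exact ((List.prefix_iff_eq_take.mp h).symm)

-- one cons step of the canonical occurrence list
theorem occFrom_cons (t sub : List Char) (k : Nat) (hk : k ≤ t.length) :
    occFrom t sub k = (if sub <+: t.drop k then [k] else []) ++ occFrom t sub (k + 1) := by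
  unfold occFrom
  rw [show t.length + 1 - k = (t.length + 1 - (k + 1)) + 1 by omega, List.range'_succ,
    List.filter_cons]
  by_cases h : sub <+: t.drop k <;> simp [h]

-- past the last possible start the occurrence list is empty (sub nonempty)
theorem occFrom_high (t sub : List Char) (k : Nat) (hL : 1 ≤ sub.length)
    (hk : t.length - sub.length < k) : occFrom t sub k = [] := by
  apply List.filter_eq_nil_iff.mpr
  intro i hi
  have hki : k ≤ i := (List.mem_range'_1.mp hi).1
  simp only [decide_eq_true_eq]
  intro hp
  have := hp.length_le
  simp only [List.length_drop] at this
  omega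

-- the rolling-hash update recomputes the hash of the next window
theorem roll (t sub : List Char) (k : Nat) (hL : 1 ≤ sub.length)
    (hk : k + sub.length < t.length) :
    PySem.Int.mod
      ((((t.drop k).take sub.length).foldl hashStep 0
          - ((t.getD k ' ').toNat : Int) * (257 ^ (sub.length - 1) % 1000000007)) * 257 +
        ((t.getD (k + sub.length) ' ').toNat : Int))
      1000000007
    = ((t.drop (k + 1)).take sub.length).foldl hashStep 0 := by
  have hkt : k < t.length := by omega
  set L := sub.length with hLdef
  set m : List Char := (t.drop (k + 1)).take (L - 1) with hm
  have hw : (t.drop k).take L = t.getD k ' ' :: m := by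
    rw [List.getD_eq_getElem t ' ' hkt, List.drop_eq_getElem_cons hkt,
        show L = (L - 1) + 1 by omega, List.take_succ_cons]
  have hlenm : m.length = L - 1 := by
    rw [hm, List.length_take, List.length_drop]; omega
  have hdx : (t.drop (k + 1))[L - 1]? = some (t.getD (k + L) ' ') := by
    rw [List.getElem?_drop, show k + 1 + (L - 1) = k + L by omega,
        List.getElem?_eq_getElem (by omega), List.getD_eq_getElem t ' ' (by omega)]
  have hnext : (t.drop (k + 1)).take L = m ++ [t.getD (k + L) ' '] := by
    conv_lhs => rw [show L = (L - 1) + 1 by omega]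
    rw [List.take_add_one, hdx]
    simp [hm]
  rw [hashOf_eq, hashOf_eq, hw, hnext, mod_big]
  set a : Int := ((t.getD k ' ').toNat : Int) with ha
  set b : Int := ((t.getD (k + L) ' ').toNat : Int) with hb
  have hpvw : pvHash (t.getD k ' ' :: m) = a * 257 ^ (L - 1) + pvHash m := by
    unfold pvHash
    simp only [List.foldl_cons]
    rw [show polyF 0 (t.getD k ' ') = a by unfold polyF; rw [ha]; ring, polyShift, hlenm]
    rfl
  have hpvn : pvHash (m ++ [t.getD (k + L) ' ']) = pvHash m * 257 + b := by
    unfold pvHash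
    rw [List.foldl_append]
    simp [polyF, hb]
  rw [hpvw, hpvn]
  have goal : (((a * 257 ^ (L - 1) + pvHash m) % 1000000007
        - a * (257 ^ (L - 1) % 1000000007)) * 257 + b)
      ≡ (pvHash m * 257 + b) [ZMOD 1000000007] := by
    have h1 : ((a * 257 ^ (L - 1) + pvHash m) % 1000000007)
        ≡ (a * 257 ^ (L - 1) + pvHash m) [ZMOD 1000000007] :=
      Int.emod_emod_of_dvd _ dvd_rfl
    have h2' : ((257 : Int) ^ (L - 1) % 1000000007)
        ≡ (257 : Int) ^ (L - 1) [ZMOD 1000000007] :=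
      Int.emod_emod_of_dvd _ dvd_rfl
    have h2 : (a * (257 ^ (L - 1) % 1000000007))
        ≡ (a * 257 ^ (L - 1)) [ZMOD 1000000007] := h2'.mul_left a
    have h3 := ((h1.sub h2).mul_right 257).add_right b
    calc (((a * 257 ^ (L - 1) + pvHash m) % 1000000007
            - a * (257 ^ (L - 1) % 1000000007)) * 257 + b)
        ≡ (((a * 257 ^ (L - 1) + pvHash m) - a * 257 ^ (L - 1)) * 257 + b) [ZMOD 1000000007] := h3
      _ = pvHash m * 257 + b := by ring
  exact goal

-- B's Rabin-Karp loop over one frame, from position k with the correct rolling hash,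
-- appends exactly the canonical occurrences at positions ≥ k.
theorem rk_go (t sub : List Char) (ph pw frame : Int)
    (hph : ph = sub.foldl hashStep 0)
    (hpw : pw = 257 ^ (sub.length - 1) % 1000000007)
    (hL : 1 ≤ sub.length) (hLT : sub.length ≤ t.length) :
    ∀ (cnt : Nat), ∀ (k : Nat) (acc : List Int) (h : Int),
    k + cnt = t.length - sub.length + 1 →
    (cnt = 0 ∨ h = ((t.drop k).take sub.length).foldl hashStep 0) →
    ((List.range' k cnt).foldl
      (fun (s : List Int × Int) (kk : Nat) =>
        ((if s.2 == ph &&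
              (PySem.Chars.slice t (some (kk : Int)) (some ((kk : Int) + (sub.length : Int))) == sub) then
            s.1 ++ [(kk : Int) * 3 + frame]
          else s.1),
         (if (kk : Int) + (sub.length : Int) < (t.length : Int) then
            PySem.Int.mod
              ((s.2 - ((PySem.List.pyGetD t (kk : Int) ' ').toNat : Int) * pw) * 257 +
                ((PySem.List.pyGetD t ((kk : Int) + (sub.length : Int)) ' ').toNat : Int))
              1000000007
          else s.2)))
      (acc, h)).1
    = acc ++ (occFrom t sub k).map (fun (i : Nat) => (i : Int) * 3 + frame) := by
  intro cnt
  induction cnt with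
  | zero =>
    intro k acc h hsum _hh
    rw [occFrom_high t sub k hL (by omega)]
    simp
  | succ cnt ih =>
    intro k acc h hsum hh
    have hwh : h = ((t.drop k).take sub.length).foldl hashStep 0 :=
      hh.resolve_left (by omega)
    have hkt : k ≤ t.length := by omega
    rw [List.range'_succ, List.foldl_cons]
    have hcond : ((h == ph) &&
        (PySem.Chars.slice t (some (k : Int)) (some ((k : Int) + (sub.length : Int))) == sub))
        = decide (sub <+: t.drop k) := by
      rw [slice_beq_eq]
      by_cases hp : sub <+: t.drop k
      · have hwin : (t.drop k).take sub.length = sub := (List.prefix_iff_eq_take.mp hp).symm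
        rw [hwh, hwin, ← hph]
        simp [hp]
      · simp [hp]
    simp only [hcond]
    rw [occFrom_cons t sub k hkt, List.map_append]
    have htail : ∀ h' : Int, (cnt = 0 ∨ h' = ((t.drop (k + 1)).take sub.length).foldl hashStep 0) →
        ∀ acc' : List Int,
        ((List.range' (k + 1) cnt).foldl
          (fun (s : List Int × Int) (kk : Nat) =>
            ((if s.2 == ph &&
                  (PySem.Chars.slice t (some (kk : Int)) (some ((kk : Int) + (sub.length : Int))) == sub) then
                s.1 ++ [(kk : Int) * 3 + frame]
              else s.1),
             (if (kk : Int) + (sub.length : Int) < (t.length : Int) then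
                PySem.Int.mod
                  ((s.2 - ((PySem.List.pyGetD t (kk : Int) ' ').toNat : Int) * pw) * 257 +
                    ((PySem.List.pyGetD t ((kk : Int) + (sub.length : Int)) ' ').toNat : Int))
                  1000000007
              else s.2)))
          (acc', h')).1
        = acc' ++ (occFrom t sub (k + 1)).map (fun (i : Nat) => (i : Int) * 3 + frame) :=
      fun h' hh' acc' => ih (k + 1) acc' h' (by omega) hh'
    by_cases hc0 : cnt = 0
    · rw [htail _ (Or.inl hc0)]
      by_cases hp : sub <+: t.drop k <;> simp [hp]
    · have hklt : k + sub.length < t.length := by omega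
      have hup : (if (k : Int) + (sub.length : Int) < (t.length : Int) then
            PySem.Int.mod
              ((h - ((PySem.List.pyGetD t (k : Int) ' ').toNat : Int) * pw) * 257 +
                ((PySem.List.pyGetD t ((k : Int) + (sub.length : Int)) ' ').toNat : Int))
              1000000007
          else h) = ((t.drop (k + 1)).take sub.length).foldl hashStep 0 := by
        rw [if_pos (by omega)]
        rw [PySem.List.pyGetD_natCast,
          show (k : Int) + (sub.length : Int) = ((k + sub.length : Nat) : Int) by push_cast; ring,
          PySem.List.pyGetD_natCast, hwh, hpw]
        exact roll t sub k hL hklt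
      rw [hup] at *
      rw [htail _ (Or.inr rfl)]
      by_cases hp : sub <+: t.drop k <;> simp [hp]

-- the port's pw loop computes 257^(L-1) mod 1e9+7 (L ≥ 1)
theorem pw_port (sub : List Char) (hL : 1 ≤ sub.length) :
    (PySem.List.pyRange 0 ((sub.length : Int) - 1) 1).foldl
      (fun p _ => PySem.Int.mod (p * 257) 1000000007) 1
    = 257 ^ (sub.length - 1) % 1000000007 := by
  rw [show ((sub.length : Int) - 1) = ((sub.length - 1 : Nat) : Int) by omega,
    PySem.List.pyRange_zero_natCast, List.foldl_map]
  exact powloop (sub.length - 1)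

-- B's per-frame branch equals appending the canonical occurrences of the frame.
theorem B_frame (t sub : List Char) (frame ph pw : Int)
    (hph : ph = sub.foldl hashStep 0)
    (hpw : 1 ≤ sub.length → pw = 257 ^ (sub.length - 1) % 1000000007)
    (out : List Int) :
    (if sub.length = 0 then
      out ++ (PySem.List.pyRange 0 ((t.length : Int) + 1) 1).map (fun i => i * 3 + frame)
    else if (t.length : Int) < (sub.length : Int) then out
    else
      ((PySem.List.pyRange 0 ((t.length : Int) - (sub.length : Int) + 1) 1).foldl
        (fun (s : List Int × Int) i =>
          ((if s.2 == ph &&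
                (PySem.Chars.slice t (some i) (some (i + (sub.length : Int))) == sub) then
              s.1 ++ [i * 3 + frame]
            else s.1),
           (if i + (sub.length : Int) < (t.length : Int) then
              PySem.Int.mod
                ((s.2 - ((PySem.List.pyGetD t i ' ').toNat : Int) * pw) * 257 +
                  ((PySem.List.pyGetD t (i + (sub.length : Int)) ' ').toNat : Int))
                1000000007
            else s.2)))
        (out, (PySem.List.slice t none (some (sub.length : Int))).foldl hashStep 0)).1)
    = out ++ (occFrom t sub 0).map (fun (i : Nat) => (i : Int) * 3 + frame) := by
  by_cases h0 : sub.length = 0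
  · rw [if_pos h0]
    have hsub : sub = [] := List.eq_nil_of_length_eq_zero h0
    have hocc : occFrom t sub 0 = List.range (t.length + 1) := by
      subst hsub
      unfold occFrom
      rw [Nat.sub_zero, ← List.range_eq_range']
      simp
    rw [hocc, show ((t.length : Int) + 1) = ((t.length + 1 : Nat) : Int) by push_cast; ring,
      PySem.List.pyRange_zero_natCast, List.map_map]
    rfl
  · have hL : 1 ≤ sub.length := by omega
    rw [if_neg h0]
    by_cases hTL : t.length < sub.length
    · rw [if_pos (by exact_mod_cast hTL)]
      have : occFrom t sub 0 = [] := by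
        apply occFrom_nil
        rw [List.drop_zero]
        intro hinf
        have := hinf.length_le
        omega
      simp [this]
    · rw [if_neg (by omega)]
      have hcast : ((t.length : Int) - (sub.length : Int) + 1)
          = ((t.length - sub.length + 1 : Nat) : Int) := by push_cast [Nat.sub_add_cancel]; omega
      rw [hcast, PySem.List.pyRange_zero_natCast, List.foldl_map, List.range_eq_range']
      have hinit : (PySem.List.slice t none (some (sub.length : Int))).foldl hashStep 0
          = ((t.drop 0).take sub.length).foldl hashStep 0 := by
        rw [PySem.List.slice_to_natCast, List.drop_zero]
      rw [hinit]
      exact rk_go t sub ph pw frame hph (hpw hL) hL (by omega)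
        (t.length - sub.length + 1) 0 out _ (by omega) (Or.inr rfl)

-- ===== VERDICT (by name: the statement is the Claim_ definition above) =====
theorem find_translation_position_spec : Claim_equal_find_translation_position := by
  intro ns aa ct _hdom
  unfold Spec_find_translation_position
  unfold find_translation_position find_translation_position_alt
  have hR : PySem.List.pyRange 0 3 1 = [0, 1, 2] := by decide
  rw [hR]
  simp only [List.foldl_cons, List.foldl_nil]
  have htr : ∀ frame : Int,
      (PySem.List.pyRange frame ((ns.toList.length : Int) - 2) 3).foldl
        (fun acc i => acc ++ (PySem.Dict.getD ⟨ct⟩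
          (String.ofList (PySem.Chars.slice ns.toList (some i) (some (i + 3)))) "-").toList) []
      = ((PySem.List.pyRange frame ((ns.toList.length : Int) - 2) 3).map
        (fun i => (PySem.Dict.getD ⟨ct⟩
          (String.ofList (PySem.Chars.slice ns.toList (some i) (some (i + 3)))) "-").toList)).flatten := by
    intro frame
    rw [PySem.List.foldl_append_eq_flatMap, List.flatMap_def, List.nil_append]
  rw [← htr 0, ← htr 1, ← htr 2]
  rw [A_contrib, A_contrib, A_contrib]
  rw [B_frame _ _ 0 _ _ rfl (fun h => pw_port aa.toList h),
      B_frame _ _ 1 _ _ rfl (fun h => pw_port aa.toList h),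
      B_frame _ _ 2 _ _ rfl (fun h => pw_port aa.toList h)]
  simp
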